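-- pv_equiv track=rewrite | github.com/48302-DiogoJesus/MacroManager | venv/Lib/site-packages/DesktopAutomationFramework/framework/MacroMonitorGUI.py | break_text_into_lines
-- ===== SOURCE A (Python) =====
-- def break_text_into_lines(text, words_per_line=6):
--     words = text.split()
--     lines = []
--     current_line = []
--
--     for word in words:
--         current_line.append(word)
--         if len(current_line) >= words_per_line:
--             lines.append(" ".join(current_line))
--             current_line = []
--
--     if current_line:
--         lines.append(" ".join(current_line))
--
--     return "\n".join(lines)
-- ===== SOURCE B (Python) =====
-- def break_text_into_lines(text, words_per_line=6):
--     words = text.split()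
--     if words_per_line <= 0:
--         return "\n".join(words)
--     lines = []
--     while words:
--         lines.append(" ".join(words[:words_per_line]))
--         words = words[words_per_line:]
--     return "\n".join(lines)
-- ===== Notes on version B (the rewrite author's own statement) =====
-- stated objective: simpler
-- what changed: B slices whole chunks of words_per_line words off the front of the word list and joins each chunk, instead of A's per-word accumulator with a flush-when-full and a trailing flush; words_per_line <= 0 (where a slice step would be invalid) returns one word per line, as A does.
import Mathlib
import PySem

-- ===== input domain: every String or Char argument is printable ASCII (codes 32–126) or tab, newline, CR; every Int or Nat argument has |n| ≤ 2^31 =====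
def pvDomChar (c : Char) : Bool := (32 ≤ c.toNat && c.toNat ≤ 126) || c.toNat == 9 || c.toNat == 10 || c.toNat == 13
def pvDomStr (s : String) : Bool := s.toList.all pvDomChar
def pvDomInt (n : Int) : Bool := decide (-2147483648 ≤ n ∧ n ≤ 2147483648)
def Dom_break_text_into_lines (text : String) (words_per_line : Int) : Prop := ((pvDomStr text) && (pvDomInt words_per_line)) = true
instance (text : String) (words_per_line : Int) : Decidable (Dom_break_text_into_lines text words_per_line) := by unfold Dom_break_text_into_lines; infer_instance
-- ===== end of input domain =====

-- B slices whole chunks of words_per_line words off the front of the word list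
-- instead of A's per-word accumulator with flush-when-full (simpler decomposition, same cost).

-- ===== PORT A =====
-- one loop iteration of A: append the word to current_line, flush when full
def pvAStep (words_per_line : Int) (st : List String × List String) (w : String) :
    List String × List String :=
  let cur := st.2 ++ [w]
  if (cur.length : Int) ≥ words_per_line then (st.1 ++ [PySem.Str.join " " cur], [])
  else (st.1, cur)

def break_text_into_lines (text : String) (words_per_line : Int) : String :=
  let words := PySem.Str.split₀ text
  let st := words.foldl (pvAStep words_per_line) ([], [])
  let lines := if st.2 ≠ [] then st.1 ++ [PySem.Str.join " " st.2] else st.1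
  PySem.Str.join "\n" lines

-- ===== PORT B =====
-- Source B's while-loop: slice a chunk of n words off the front, join it, repeat.
-- (n = 0 never occurs on B's calls — the words_per_line ≤ 0 branch returns first;
--  the n = 0 test below only makes the recursion total.)
def pvBLoop (n : Nat) (ws : List String) (lines : List String) : List String :=
  if ws = [] then lines
  else if n = 0 then lines
  else pvBLoop n (PySem.List.slice ws (some (n : Int)) none)
         (lines ++ [PySem.Str.join " " (PySem.List.slice ws none (some (n : Int)))])
termination_by ws.length
decreasing_by
  simp only [PySem.List.slice_from_natCast, List.length_drop]
  rename_i h1 h2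
  have : ws.length ≠ 0 := fun h => h1 (List.length_eq_zero_iff.mp h)
  omega

def break_text_into_lines_alt (text : String) (words_per_line : Int) : String :=
  let words := PySem.Str.split₀ text
  if words_per_line ≤ 0 then PySem.Str.join "\n" words
  else PySem.Str.join "\n" (pvBLoop words_per_line.toNat words [])

-- ===== PRECONDITION & SPEC =====
def Spec_break_text_into_lines (text : String) (words_per_line : Int) (out : String) : Prop := out = break_text_into_lines_alt text words_per_line
instance (text : String) (words_per_line : Int) (out : String) : Decidable (Spec_break_text_into_lines text words_per_line out) := by unfold Spec_break_text_into_lines; infer_instance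

-- ===== CLAIM (what is proved, stated in full; the proofs are below) =====
def Claim_equal_break_text_into_lines : Prop := ∀ (text : String) (words_per_line : Int), Dom_break_text_into_lines text words_per_line → Spec_break_text_into_lines text words_per_line (break_text_into_lines text words_per_line)

-- ===== LEMMAS AND PROOFS =====

-- unfold pvBLoop exactly once
theorem pvBLoop_unfold (n : Nat) (ws lines : List String) :
    pvBLoop n ws lines =
      if ws = [] then lines
      else if n = 0 then lines
      else pvBLoop n (PySem.List.slice ws (some (n : Int)) none)
             (lines ++ [PySem.Str.join " " (PySem.List.slice ws none (some (n : Int)))]) := by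
  rw [pvBLoop]

-- Str.join of a one-word line is the word itself
theorem pvJoin_singleton (w : String) : PySem.Str.join " " [w] = w := by
  simp [PySem.Str.join, PySem.Chars.join_singleton]

-- words_per_line ≤ 0: A flushes after every word
theorem pvFoldl_nonpos (k : Int) (hk : k ≤ 0) (ws lines : List String) :
    ws.foldl (pvAStep k) (lines, []) =
      (lines ++ ws.map (fun w => PySem.Str.join " " [w]), []) := by
  induction ws generalizing lines with
  | nil => simp
  | cons w ws ih =>
    have hstep : pvAStep k (lines, []) w = (lines ++ [PySem.Str.join " " [w]], []) := by
      simp only [pvAStep]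
      split_ifs with h
      · rfl
      · exact absurd (by simp; omega) h
    rw [List.foldl_cons, hstep, ih]
    simp

-- pvBLoop moves its accumulator to the front
theorem pvBLoop_acc (n : Nat) (ws lines : List String) :
    pvBLoop n ws lines = lines ++ pvBLoop n ws [] := by
  by_cases h1 : ws = []
  · rw [pvBLoop_unfold, if_pos h1, pvBLoop_unfold, if_pos h1, List.append_nil]
  · by_cases h2 : n = 0
    · rw [pvBLoop_unfold, if_neg h1, if_pos h2,
          pvBLoop_unfold n ws [], if_neg h1, if_pos h2, List.append_nil]
    · rw [pvBLoop_unfold, if_neg h1, if_neg h2,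
          pvBLoop_unfold n ws [], if_neg h1, if_neg h2]
      rw [pvBLoop_acc n (PySem.List.slice ws (some (n : Int)) none)
            (lines ++ [PySem.Str.join " " (PySem.List.slice ws none (some (n : Int)))]),
          pvBLoop_acc n (PySem.List.slice ws (some (n : Int)) none)
            ([] ++ [PySem.Str.join " " (PySem.List.slice ws none (some (n : Int)))])]
      simp
termination_by ws.length
decreasing_by
  all_goals
    simp only [PySem.List.slice_from_natCast, List.length_drop]
    have : ws.length ≠ 0 := fun h => h1 (List.length_eq_zero_iff.mp h)
    omega

-- main invariant of A's loop for positive words_per_line: finalizing A's fold from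
-- state (lines, cur) with cur not yet full gives lines ++ B's chunking of cur ++ ws
theorem pvLoop_inv (k : Int) (hk : 1 ≤ k) (ws cur lines : List String)
    (hcur : cur.length < k.toNat) :
    (if (ws.foldl (pvAStep k) (lines, cur)).2 ≠ [] then
        (ws.foldl (pvAStep k) (lines, cur)).1
          ++ [PySem.Str.join " " (ws.foldl (pvAStep k) (lines, cur)).2]
      else (ws.foldl (pvAStep k) (lines, cur)).1) =
      lines ++ pvBLoop k.toNat (cur ++ ws) [] := by
  induction ws generalizing cur lines with
  | nil =>
    simp only [List.foldl_nil, List.append_nil]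
    by_cases h : cur = []
    · subst h
      rw [pvBLoop_unfold, if_pos rfl]
      simp
    · rw [if_pos (by simpa using h)]
      rw [pvBLoop_unfold, if_neg h, if_neg (by omega)]
      have ht : PySem.List.slice cur none (some ((k.toNat : Nat) : Int)) = cur := by
        rw [PySem.List.slice_to_natCast]
        exact List.take_of_length_le (by omega)
      have hd : PySem.List.slice cur (some ((k.toNat : Nat) : Int)) none = [] := by
        rw [PySem.List.slice_from_natCast]
        exact List.drop_eq_nil_of_le (by omega)
      rw [ht, hd, pvBLoop_unfold, if_pos rfl]
      simp
  | cons w ws ih =>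
    simp only [List.foldl_cons]
    by_cases hfull : ((cur ++ [w]).length : Int) ≥ k
    · have hlen : (cur ++ [w]).length = k.toNat := by
        simp at hfull ⊢; omega
      have hstep : pvAStep k (lines, cur) w
          = (lines ++ [PySem.Str.join " " (cur ++ [w])], []) := by
        simp only [pvAStep]
        rw [if_pos hfull]
      have ht : PySem.List.slice ((cur ++ [w]) ++ ws) none (some ((k.toNat : Nat) : Int))
          = cur ++ [w] := by
        rw [PySem.List.slice_to_natCast, ← hlen, List.take_left]
      have hd : PySem.List.slice ((cur ++ [w]) ++ ws) (some ((k.toNat : Nat) : Int)) none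
          = ws := by
        rw [PySem.List.slice_from_natCast, ← hlen, List.drop_left]
      rw [hstep, ih [] (lines ++ [PySem.Str.join " " (cur ++ [w])])
            (by simp only [List.length_nil]; omega)]
      simp only [List.nil_append]
      have hsplit : cur ++ w :: ws = (cur ++ [w]) ++ ws := by simp
      rw [hsplit, pvBLoop_unfold k.toNat ((cur ++ [w]) ++ ws) [], if_neg (by simp),
          if_neg (by omega), ht, hd,
          pvBLoop_acc k.toNat ws ([] ++ [PySem.Str.join " " (cur ++ [w])])]
      simp
    · have hstep : pvAStep k (lines, cur) w = (lines, cur ++ [w]) := by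
        simp only [pvAStep]
        rw [if_neg hfull]
      rw [hstep, ih (cur ++ [w]) lines (by omega)]
      simp

-- ===== VERDICT (by name: the statement is the Claim_ definition above) =====
theorem break_text_into_lines_spec : Claim_equal_break_text_into_lines := by
  intro text k _
  unfold Spec_break_text_into_lines break_text_into_lines break_text_into_lines_alt
  by_cases hk : k ≤ 0
  · rw [if_pos hk]
    simp only
    rw [pvFoldl_nonpos k hk _ []]
    simp only [List.nil_append]
    rw [if_neg (by simp)]
    congr 1
    rw [List.map_congr_left fun w _ => pvJoin_singleton w, List.map_id']
  · rw [if_neg hk]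
    simp only
    have := pvLoop_inv k (by omega) (PySem.Str.split₀ text) [] [] (by simp; omega)
    simp only [List.nil_append] at this
    rw [this]
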